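-- pv_equiv track=rewrite | github.com/clarud/privately | privately-dataset/create_data.py | bio_tags
-- ===== SOURCE A (Python) =====
-- def token_offsets(text: str, tokens):
--     offs=[]; pos=0
--     for t in tokens:
--         i = text.find(t, pos)
--         if i < 0: i = pos
--         offs.append((i, i+len(t))); pos = i+len(t)
--     return offs
--
-- def bio_tags(tokens, text, spans):
--     """
--     spans: list of (start, end, label) with labels in {"PER","ADDR","ORG"}
--     """
--     tags = ["O"]*len(tokens)
--     offs = token_offsets(text, tokens)
--     for (s,e,lab) in spans:
--         begun=False
--         for i,(ts,te) in enumerate(offs):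
--             if te <= s or ts >= e: continue
--             tags[i] = ("B-"+lab) if not begun else ("I-"+lab)
--             begun = True
--     return tags
-- ===== SOURCE B (Python) =====
-- def token_offsets(text: str, tokens):
--     offs=[]; pos=0
--     for t in tokens:
--         i = text.find(t, pos)
--         if i < 0: i = pos
--         offs.append((i, i+len(t))); pos = i+len(t)
--     return offs
--
-- def bio_tags(tokens, text, spans):
--     # token-major: one tag per token, last overlapping span wins;
--     # "B-" iff this token is the span's first overlapping token.
--     offs = token_offsets(text, tokens)
--     firsts = [next((j for j, (ts, te) in enumerate(offs) if te > s and ts < e), None)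
--               for (s, e, _lab) in spans]
--     out = []
--     for i, (ts, te) in enumerate(offs):
--         tag = "O"
--         for (s, e, lab), f in zip(spans, firsts):
--             if te > s and ts < e:
--                 tag = ("B-" if f == i else "I-") + lab
--         out.append(tag)
--     return out
-- ===== Notes on version B (the rewrite author's own statement) =====
-- stated objective: alternative
-- what changed: B is token-major: it precomputes each span's first overlapping token index once, then builds the tag list one token at a time (last overlapping span wins, 'B-' iff the token is that span's first overlap), instead of A's span-major in-place overwriting of a tags array with a 'begun' flag.
import Mathlib
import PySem

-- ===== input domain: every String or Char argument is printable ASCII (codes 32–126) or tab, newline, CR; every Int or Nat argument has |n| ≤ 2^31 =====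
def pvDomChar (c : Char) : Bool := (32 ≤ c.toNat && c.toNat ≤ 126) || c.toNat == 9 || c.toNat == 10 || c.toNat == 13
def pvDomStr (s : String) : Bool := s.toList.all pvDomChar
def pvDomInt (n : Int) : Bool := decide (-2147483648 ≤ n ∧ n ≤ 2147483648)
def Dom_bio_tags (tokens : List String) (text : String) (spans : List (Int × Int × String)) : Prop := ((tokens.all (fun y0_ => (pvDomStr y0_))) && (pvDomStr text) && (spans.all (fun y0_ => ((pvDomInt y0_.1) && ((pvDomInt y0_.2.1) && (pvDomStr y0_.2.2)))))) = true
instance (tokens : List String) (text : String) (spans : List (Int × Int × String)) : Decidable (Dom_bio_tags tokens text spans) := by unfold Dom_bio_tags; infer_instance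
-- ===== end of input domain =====

-- B is token-major (one output tag per token, last overlapping span wins, using each
-- span's precomputed first overlapping token) instead of A's span-major tag-array
-- overwriting; alternative decomposition, same asymptotic cost.

-- ===== PORT A =====
def token_offsets (text : String) (tokens : List String) : List (Int × Int) :=
  (tokens.foldl
    (fun (st : List (Int × Int) × Int) t =>
      let i0 := PySem.Str.findFrom text t st.2
      let i := if i0 < 0 then st.2 else i0
      (st.1 ++ [(i, i + PySem.Str.len t)], i + PySem.Str.len t))
    ([], 0)).1

def bio_tags (tokens : List String) (text : String) (spans : List (Int × Int × String)) : List String :=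
  let tags := List.replicate tokens.length "O"
  let offs := token_offsets text tokens
  spans.foldl
    (fun tags sp =>
      ((PySem.List.enumerate offs 0).foldl
        (fun (st : List String × Bool) io =>
          if io.2.2 ≤ sp.1 ∨ io.2.1 ≥ sp.2.1 then st
          else (PySem.List.pySetD st.1 io.1 (if st.2 then "I-" ++ sp.2.2 else "B-" ++ sp.2.2), true))
        (tags, false)).1)
    tags

-- ===== PORT B =====
def bio_tags_alt (tokens : List String) (text : String) (spans : List (Int × Int × String)) : List String :=
  let offs := token_offsets text tokens
  let firsts := spans.map (fun sp =>
    ((PySem.List.enumerate offs 0).find?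
        (fun jo => decide (jo.2.2 > sp.1) && decide (jo.2.1 < sp.2.1))).map (·.1))
  (PySem.List.enumerate offs 0).map (fun io =>
    (spans.zip firsts).foldl
      (fun tag spf =>
        if spf.1.1 < io.2.2 ∧ io.2.1 < spf.1.2.1 then
          (if spf.2 = some io.1 then "B-" else "I-") ++ spf.1.2.2
        else tag)
      "O")

-- ===== PRECONDITION & SPEC =====
def Spec_bio_tags (tokens : List String) (text : String) (spans : List (Int × Int × String)) (out : List String) : Prop := out = bio_tags_alt tokens text spans
instance (tokens : List String) (text : String) (spans : List (Int × Int × String)) (out : List String) : Decidable (Spec_bio_tags tokens text spans out) := by unfold Spec_bio_tags; infer_instance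

-- ===== CLAIM (what is proved, stated in full; the proofs are below) =====
def Claim_equal_bio_tags : Prop := ∀ (tokens : List String) (text : String) (spans : List (Int × Int × String)), Dom_bio_tags tokens text spans → Spec_bio_tags tokens text spans (bio_tags tokens text spans)

-- ===== LEMMAS AND PROOFS =====

-- overlap test (shared by both ports' conditions)
def pvQ (sp : Int × Int × String) (o : Int × Int) : Bool :=
  decide (o.2 > sp.1) && decide (o.1 < sp.2.1)

-- per-index effect of one span on one tag
def pvG (offs : List (Int × Int)) (i : Nat) (t : String) (sp : Int × Int × String) : String :=
  match offs[i]? with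
  | some o =>
      if pvQ sp o then
        (if offs.findIdx? (pvQ sp) = some i then "B-" else "I-") ++ sp.2.2
      else t
  | none => t

-- token_offsets has one entry per token
lemma pv_len_offsets_aux (text : String) :
    ∀ (tokens : List String) (acc : List (Int × Int)) (pos : Int),
      ((tokens.foldl
        (fun (st : List (Int × Int) × Int) t =>
          let i0 := PySem.Str.findFrom text t st.2
          let i := if i0 < 0 then st.2 else i0
          (st.1 ++ [(i, i + PySem.Str.len t)], i + PySem.Str.len t))
        (acc, pos)).1).length = acc.length + tokens.length := by
  intro tokens
  induction tokens with
  | nil => intro acc pos; simp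
  | cons t ts ih =>
      intro acc pos
      simp only [List.foldl_cons]
      rw [ih]
      simp
      omega

lemma pv_len_offsets (text : String) (tokens : List String) :
    (token_offsets text tokens).length = tokens.length := by
  unfold token_offsets
  rw [pv_len_offsets_aux]
  simp

-- A's inner loop preserves the tag list's length
lemma pv_inner_len (sp : Int × Int × String) :
    ∀ (rest : List (Int × Int)) (k : Int) (tags : List String) (b : Bool),
      (((PySem.List.enumerate rest k).foldl
        (fun (st : List String × Bool) io =>
          if io.2.2 ≤ sp.1 ∨ io.2.1 ≥ sp.2.1 then st
          else (PySem.List.pySetD st.1 io.1 (if st.2 then "I-" ++ sp.2.2 else "B-" ++ sp.2.2), true))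
        (tags, b)).1).length = tags.length := by
  intro rest
  induction rest with
  | nil => intro k tags b; simp [PySem.List.enumerate_nil]
  | cons o os ih =>
      intro k tags b
      rw [PySem.List.enumerate_cons, List.foldl_cons]
      by_cases h : o.2 ≤ sp.1 ∨ o.1 ≥ sp.2.1
      · simp only [h, if_pos]
        exact ih (k+1) tags b
      · simp only [h, ite_false]
        rw [ih]
        exact PySem.List.length_pySetD _ _ _

-- pointwise characterisation of A's inner loop
lemma pv_inner_char (sp : Int × Int × String) :
    ∀ (rest : List (Int × Int)) (k : Nat) (tags : List String) (b : Bool) (i : Nat),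
      ((((PySem.List.enumerate rest (k : Int)).foldl
        (fun (st : List String × Bool) io =>
          if io.2.2 ≤ sp.1 ∨ io.2.1 ≥ sp.2.1 then st
          else (PySem.List.pySetD st.1 io.1 (if st.2 then "I-" ++ sp.2.2 else "B-" ++ sp.2.2), true))
        (tags, b)).1)[i]?) =
      if k ≤ i ∧ i < tags.length then
        match rest[i - k]? with
        | some o =>
            if pvQ sp o then
              some ((if b = false ∧ rest.findIdx? (pvQ sp) = some (i - k) then "B-" else "I-") ++ sp.2.2)
            else tags[i]?
        | none => tags[i]?
      else tags[i]? := by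
  intro rest
  induction rest with
  | nil =>
      intro k tags b i
      simp [PySem.List.enumerate_nil]
  | cons o os ih =>
      intro k tags b i
      rw [PySem.List.enumerate_cons, List.foldl_cons]
      have hcast : (k : Int) + 1 = ((k + 1 : Nat) : Int) := by push_cast; ring
      by_cases hq : pvQ sp o = true
      · -- o overlaps the span: the step writes position k and sets the flag
        have hcond : ¬ (o.2 ≤ sp.1 ∨ o.1 ≥ sp.2.1) := by
          simp only [pvQ, Bool.and_eq_true, decide_eq_true_eq] at hq
          omega
        simp only [if_neg hcond]
        rw [hcast, PySem.List.pySetD_natCast, ih (k+1) _ true i]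
        simp only [List.length_set]
        rcases Nat.lt_trichotomy i k with hik | hik | hik
        · have hki : k ≠ i := by omega
          rw [if_neg (show ¬ (k + 1 ≤ i ∧ i < tags.length) by omega),
              if_neg (show ¬ (k ≤ i ∧ i < tags.length) by omega),
              List.getElem?_set_ne hki]
        · subst hik
          rw [if_neg (show ¬ (i + 1 ≤ i ∧ i < tags.length) by omega)]
          by_cases hlt : i < tags.length
          · rw [List.getElem?_set_self hlt,
                if_pos (show i ≤ i ∧ i < tags.length from ⟨le_rfl, hlt⟩),
                show i - i = 0 from by omega]
            simp only [List.getElem?_cons_zero, List.findIdx?_cons, hq, if_pos]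
            cases b <;> simp
          · rw [if_neg (show ¬ (i ≤ i ∧ i < tags.length) by omega),
              List.getElem?_eq_none (show tags.length ≤ i by omega)]
            exact List.getElem?_eq_none (by simp; omega)
        · have hki : k ≠ i := by omega
          rw [show i - k = (i - (k + 1)) + 1 from by omega]
          simp only [List.getElem?_cons_succ, List.getElem?_set_ne hki,
                     show (k ≤ i ∧ i < tags.length) ↔ (k + 1 ≤ i ∧ i < tags.length) from by omega]
          cases hofs : os[i - (k + 1)]? with
          | none => rfl
          | some o' =>
              by_cases hq' : pvQ sp o' = true
              · simp [hq', List.findIdx?_cons, hq]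
              · simp [hq']
      · -- o does not overlap: the step skips
        have hcond : (o.2 ≤ sp.1 ∨ o.1 ≥ sp.2.1) := by
          simp only [pvQ, Bool.and_eq_true, decide_eq_true_eq] at hq
          omega
        simp only [if_pos hcond]
        rw [hcast, ih (k+1) tags b i]
        rcases Nat.lt_trichotomy i k with hik | hik | hik
        · rw [if_neg (show ¬ (k + 1 ≤ i ∧ i < tags.length) by omega),
              if_neg (show ¬ (k ≤ i ∧ i < tags.length) by omega)]
        · subst hik
          rw [if_neg (show ¬ (i + 1 ≤ i ∧ i < tags.length) by omega)]
          by_cases hlt : i < tags.length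
          · rw [if_pos (show i ≤ i ∧ i < tags.length from ⟨le_rfl, hlt⟩),
                show i - i = 0 from by omega]
            simp [hq]
          · rw [if_neg (show ¬ (i ≤ i ∧ i < tags.length) by omega)]
        · rw [show i - k = (i - (k + 1)) + 1 from by omega]
          simp only [List.getElem?_cons_succ,
                     show (k ≤ i ∧ i < tags.length) ↔ (k + 1 ≤ i ∧ i < tags.length) from by omega]
          cases hofs : os[i - (k + 1)]? with
          | none => rfl
          | some o' =>
              by_cases hq' : pvQ sp o' = true
              · have hfi : (List.findIdx? (pvQ sp) (o :: os) = some (i - (k + 1) + 1)) ↔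
                    (List.findIdx? (pvQ sp) os = some (i - (k + 1))) := by
                  rw [List.findIdx?_cons, if_neg hq]
                  cases List.findIdx? (pvQ sp) os <;> simp
                simp only [hq', if_true, hfi]
              · simp [hq']

-- one span's update, pointwise
lemma pv_update_char (sp : Int × Int × String) (offs : List (Int × Int)) (tags : List String)
    (hlen : tags.length = offs.length) (i : Nat) :
    ((((PySem.List.enumerate offs 0).foldl
      (fun (st : List String × Bool) io =>
        if io.2.2 ≤ sp.1 ∨ io.2.1 ≥ sp.2.1 then st
        else (PySem.List.pySetD st.1 io.1 (if st.2 then "I-" ++ sp.2.2 else "B-" ++ sp.2.2), true))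
      (tags, false)).1)[i]?) = (tags[i]?).map (fun t => pvG offs i t sp) := by
  have h := pv_inner_char sp offs 0 tags false i
  simp only [Nat.cast_zero, Nat.sub_zero] at h
  rw [h]
  by_cases hi : i < tags.length
  · rw [if_pos ⟨Nat.zero_le i, hi⟩]
    have hio : offs[i]? = some (offs[i]'(by omega)) := List.getElem?_eq_getElem (by omega)
    have hit : tags[i]? = some (tags[i]'hi) := List.getElem?_eq_getElem hi
    rw [hio, hit]
    by_cases hpq : pvQ sp (offs[i]'(by omega)) = true <;>
      simp [pvG, hio, hpq]
  · rw [if_neg (by omega)]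
    rw [List.getElem?_eq_none (by omega)]
    rfl

-- the whole of A, pointwise
lemma pv_outer_char (offs : List (Int × Int)) :
    ∀ (spans : List (Int × Int × String)) (tags : List String), tags.length = offs.length → ∀ (i : Nat),
      ((spans.foldl
        (fun tags sp =>
          ((PySem.List.enumerate offs 0).foldl
            (fun (st : List String × Bool) io =>
              if io.2.2 ≤ sp.1 ∨ io.2.1 ≥ sp.2.1 then st
              else (PySem.List.pySetD st.1 io.1 (if st.2 then "I-" ++ sp.2.2 else "B-" ++ sp.2.2), true))
            (tags, false)).1)
        tags)[i]?) = (tags[i]?).map (fun t => spans.foldl (pvG offs i) t) := by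
  intro spans
  induction spans with
  | nil => intro tags h i; simp
  | cons sp sps ih =>
      intro tags h i
      rw [List.foldl_cons]
      have hlen2 := pv_inner_len sp offs 0 tags false
      rw [ih _ (by rw [hlen2, h]), pv_update_char sp offs tags h i]
      cases tags[i]? <;> simp

-- B's first-overlap search over enumerate, as findIdx?
lemma pv_find_enum (p : (Int × Int) → Bool) :
    ∀ (xs : List (Int × Int)) (k : Nat),
      ((PySem.List.enumerate xs (k : Int)).find? (fun jo => p jo.2)).map (·.1) =
        (xs.findIdx? p).map (fun j => ((k + j : Nat) : Int)) := by
  intro xs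
  induction xs with
  | nil => intro k; simp [PySem.List.enumerate_nil]
  | cons x xs ih =>
      intro k
      rw [PySem.List.enumerate_cons, List.findIdx?_cons]
      by_cases hp : p x = true
      · simp [hp]
      · simp only [List.find?_cons]
        have hp' : p x = false := by simpa using hp
        rw [hp',
            show (k : Int) + 1 = ((k + 1 : Nat) : Int) from by push_cast; ring, ih (k + 1)]
        cases List.findIdx? p xs with
        | none => rfl
        | some j => simp; ring

lemma pv_zip_map_self {α β : Type} (l : List α) (f : α → β) :
    l.zip (l.map f) = l.map (fun x => (x, f x)) := by
  induction l with
  | nil => rfl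
  | cons x xs ih => simp [ih]

-- ===== VERDICT (by name: the statement is the Claim_ definition above) =====
theorem bio_tags_spec : Claim_equal_bio_tags := by
  intro tokens text spans _hdom
  unfold Spec_bio_tags
  simp only [bio_tags, bio_tags_alt]
  apply List.ext_getElem?
  intro i
  have hntok : tokens.length = (token_offsets text tokens).length := (pv_len_offsets text tokens).symm
  have hlen : (List.replicate tokens.length "O").length = (token_offsets text tokens).length := by
    simp [hntok]
  rw [pv_outer_char (token_offsets text tokens) spans _ hlen i, List.getElem?_map,
      PySem.List.getElem?_enumerate, List.getElem?_replicate]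
  by_cases hi : i < (token_offsets text tokens).length
  · rw [if_pos (by omega)]
    have hio : (token_offsets text tokens)[i]? = some ((token_offsets text tokens)[i]'(by omega)) :=
      List.getElem?_eq_getElem (by omega)
    rw [hio]
    simp only [Option.map_some]
    congr 1
    rw [pv_zip_map_self, List.foldl_map]
    have hfun :
        (fun (tag : String) (sp : Int × Int × String) =>
          if sp.1 < (0 + (i : Int), (token_offsets text tokens)[i]'(by omega)).2.2 ∧
              (0 + (i : Int), (token_offsets text tokens)[i]'(by omega)).2.1 < sp.2.1 then
            (if ((PySem.List.enumerate (token_offsets text tokens) 0).find?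
                  (fun jo => decide (jo.2.2 > sp.1) && decide (jo.2.1 < sp.2.1))).map (·.1) =
                some (0 + (i : Int), (token_offsets text tokens)[i]'(by omega)).1 then "B-" else "I-")
              ++ sp.2.2
          else tag) =
        (fun (tag : String) (sp : Int × Int × String) => pvG (token_offsets text tokens) i tag sp) := by
      funext tag sp
      have hfind := pv_find_enum (pvQ sp) (token_offsets text tokens) 0
      simp only [Nat.cast_zero, Nat.zero_add] at hfind
      show (if sp.1 < ((token_offsets text tokens)[i]'(by omega)).2 ∧
              ((token_offsets text tokens)[i]'(by omega)).1 < sp.2.1 then _ else tag) = _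
      rw [show (fun (jo : Int × (Int × Int)) => decide (jo.2.2 > sp.1) && decide (jo.2.1 < sp.2.1)) =
            (fun (jo : Int × (Int × Int)) => pvQ sp jo.2) from rfl, hfind]
      simp only [pvG, hio]
      by_cases hpq : pvQ sp ((token_offsets text tokens)[i]'(by omega)) = true
      · rw [if_pos (by simp only [pvQ, Bool.and_eq_true, decide_eq_true_eq] at hpq; omega),
            if_pos hpq]
        congr 1
        cases hfi : List.findIdx? (pvQ sp) (token_offsets text tokens) with
        | none => simp
        | some j =>
            by_cases hji : j = i
            · simp [hji]
            · simp [hji]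
      · rw [if_neg (by simp only [pvQ, Bool.and_eq_true, decide_eq_true_eq] at hpq; omega),
            if_neg hpq]
    rw [hfun]
  · rw [if_neg (by omega), List.getElem?_eq_none (by omega)]
    rfl
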